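-- pv_equiv track=rewrite | github.com/israncho/evo_bio_computing | src/continuous/binary_representation.py | encode_aux
-- ===== SOURCE A (Python) =====
-- from typing import List, Tuple
-- from math import log2
--
-- def encode_aux(n_to_encode: int, n_bits: int) -> List[int]:
--     """
--     Encode a natural number into a list of bits.
--     Args:
--         n_to_encode (int): The integer to encode.
--         n_bits (int): Number of bits for encoding.
--     Returns:
--         List[int]: List of bits representing the encoded integer,
--             least significant bit at start of the list.
--     """
--     assert n_to_encode >= 0, 'Only natural numbers.'
--     if n_to_encode == 0:
--         return [0] * n_bits
--
--     assert int(log2(n_to_encode) + 1) <= n_bits, 'Not enough bits to encode.'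
--
--     encoded_num = []
--     while n_to_encode > 0:
--         bit = n_to_encode & 1 # bit menos significativo
--         encoded_num.append(bit)
--         n_to_encode >>= 1     # corrimiento de bits a la derecha
--
--     while len(encoded_num) < n_bits:
--         encoded_num.append(0)
--
--     return encoded_num
-- ===== SOURCE B (Python) =====
-- from typing import List
-- from math import log2
--
--
-- def encode_aux(n_to_encode: int, n_bits: int) -> List[int]:
--     """Little-endian fixed-width bit list of a natural number: bit i is
--     (n >> i) & 1, read off directly per position in one comprehension."""
--     return [(n_to_encode >> i) & 1 for i in range(n_bits)]
-- ===== Notes on version B (the rewrite author's own statement) =====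
-- stated objective: simpler
-- what changed: A's destructive shift/mask while-loop over the shrinking value plus a second padding loop is replaced by a single comprehension that reads bit i as (n >> i) & 1 for each position i in range(n_bits); Pre_ excludes exactly the inputs where A's two asserts raise (negative n, or positive n needing more than n_bits bits), on which A returns nothing.
import Mathlib
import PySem

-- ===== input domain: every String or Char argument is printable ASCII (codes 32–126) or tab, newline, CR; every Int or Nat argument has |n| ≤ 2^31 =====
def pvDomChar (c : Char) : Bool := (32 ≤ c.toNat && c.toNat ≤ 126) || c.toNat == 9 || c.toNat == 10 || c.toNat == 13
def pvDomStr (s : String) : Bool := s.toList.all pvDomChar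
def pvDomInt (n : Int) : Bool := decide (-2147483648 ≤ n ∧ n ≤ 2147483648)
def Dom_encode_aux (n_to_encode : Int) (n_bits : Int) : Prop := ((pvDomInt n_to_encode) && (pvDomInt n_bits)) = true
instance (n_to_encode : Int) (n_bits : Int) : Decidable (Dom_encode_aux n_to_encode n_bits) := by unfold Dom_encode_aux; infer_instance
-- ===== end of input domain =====

-- B replaces A's shift/mask while-loop plus padding loop with a single per-position
-- comprehension [(n >> i) & 1 for i in range(n_bits)] (simpler; same asymptotic cost).


-- ===== PORT A =====
-- termination fact for the while-loop recursion, cited by `decreasing_by`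
theorem pvShiftRightOne (n : Int) : n >>> (1 : Nat) = n / 2 := by
  rw [Int.shiftRight_eq_div_pow n 1]; norm_num

-- the `while n_to_encode > 0` loop: appends n & 1, then n >>= 1
def encodeLoop (n : Int) : List Int :=
  if _h : 0 < n then PySem.Int.band n 1 :: encodeLoop (n >>> (1 : Nat)) else []
  termination_by n.toNat
  decreasing_by rw [pvShiftRightOne]; omega

def encode_aux (n_to_encode : Int) (n_bits : Int) : List Int :=
  -- asserts are not modeled: Pre_ excludes exactly the inputs where they fire
  if n_to_encode = 0 then List.replicate n_bits.toNat 0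
  else
    let e := encodeLoop n_to_encode
    -- `while len(encoded_num) < n_bits: append 0`
    e ++ List.replicate (n_bits - (e.length : Int)).toNat 0

-- ===== PORT B =====
def encode_aux_alt (n_to_encode : Int) (n_bits : Int) : List Int :=
  (PySem.List.pyRange 0 n_bits 1).map (fun i => PySem.Int.band (n_to_encode >>> i.toNat) 1)

-- ===== PRECONDITION & SPEC =====
-- Pre_ excludes exactly the inputs where A's asserts raise AssertionError
-- (n_to_encode < 0, or n_to_encode > 0 with bit-length exceeding n_bits); A returns no value there.
def Pre_encode_aux (n_to_encode : Int) (n_bits : Int) : Prop :=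
  0 ≤ n_to_encode ∧ (n_to_encode = 0 ∨ n_to_encode < 2 ^ n_bits.toNat)
instance (n_to_encode : Int) (n_bits : Int) : Decidable (Pre_encode_aux n_to_encode n_bits) := by unfold Pre_encode_aux; infer_instance
def pvWitness_encode_aux : Int × Int := (6, 5)

def Spec_encode_aux (n_to_encode : Int) (n_bits : Int) (out : List Int) : Prop := out = encode_aux_alt n_to_encode n_bits
instance (n_to_encode : Int) (n_bits : Int) (out : List Int) : Decidable (Spec_encode_aux n_to_encode n_bits out) := by unfold Spec_encode_aux; infer_instance

-- ===== CLAIM (what is proved, stated in full; the proofs are below) =====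
def Claim_equal_encode_aux : Prop := ∀ (n_to_encode : Int) (n_bits : Int), Dom_encode_aux n_to_encode n_bits → Pre_encode_aux n_to_encode n_bits → Spec_encode_aux n_to_encode n_bits (encode_aux n_to_encode n_bits)

-- ===== LEMMAS AND PROOFS =====
theorem pvShiftRightSucc (n : Int) (i : Nat) : n >>> (i + 1) = (n >>> (1 : Nat)) >>> i := by
  rw [Int.shiftRight_eq_div_pow n (i + 1), Int.shiftRight_eq_div_pow n 1,
    Int.shiftRight_eq_div_pow _ i]
  push_cast
  rw [Int.ediv_ediv_of_nonneg (by norm_num), ← pow_succ']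

theorem pvShiftRightZero' (n : Int) : n >>> (0 : Nat) = n := by
  rw [Int.shiftRight_eq_div_pow n 0]; norm_num

theorem pvZeroBits (m : Nat) :
    (List.range m).map (fun (i : Nat) => PySem.Int.band ((0 : Int) >>> i) 1) = List.replicate m 0 := by
  rw [List.eq_replicate_iff]
  refine ⟨by simp, ?_⟩
  intro b hb
  simp only [List.mem_map, List.mem_range] at hb
  obtain ⟨i, _, rfl⟩ := hb
  have h0 : (0 : Int) >>> i = 0 := by
    rw [Int.shiftRight_eq_div_pow 0 i]; simp
  rw [h0, PySem.Int.band_one]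
  decide

theorem pvMain (m : Nat) : ∀ n : Int, 0 ≤ n → n < 2 ^ m →
    encodeLoop n ++ List.replicate (m - (encodeLoop n).length) (0:Int)
      = (List.range m).map (fun (i : Nat) => PySem.Int.band (n >>> i) 1) := by
  induction m with
  | zero =>
    intro n h1 h2
    norm_num at h2
    have hn : n = 0 := by omega
    subst hn
    rw [encodeLoop.eq_def]
    simp
  | succ m ih =>
    intro n h1 h2
    by_cases h0 : 0 < n
    · rw [encodeLoop, dif_pos h0]
      have hb : (n >>> (1 : Nat)) < 2 ^ m := by
        rw [pvShiftRightOne]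
        have : (2 : Int) ^ (m + 1) = 2 ^ m * 2 := by ring
        omega
      have hnn : 0 ≤ n >>> (1 : Nat) := by rw [pvShiftRightOne]; omega
      rw [List.range_succ_eq_map, List.map_cons, List.map_map]
      simp only [List.cons_append, List.length_cons, Nat.succ_sub_succ]
      rw [ih _ hnn hb]
      congr 1
      · rw [pvShiftRightZero']
      · apply List.map_congr_left
        intro i _
        simp only [Function.comp]
        rw [Nat.succ_eq_add_one, pvShiftRightSucc n i]
    · have hn : n = 0 := by omega
      subst hn
      rw [encodeLoop.eq_def]
      simp only [dif_neg h0, List.nil_append, List.length_nil, Nat.sub_zero]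
      rw [pvZeroBits]

theorem pvAltEq (n k : Int) :
    encode_aux_alt n k = (List.range k.toNat).map (fun (i : Nat) => PySem.Int.band (n >>> i) 1) := by
  unfold encode_aux_alt
  rw [PySem.List.pyRange_one]
  simp [List.map_map, Function.comp_def, Int.shiftRight_natCast_right]

-- ===== VERDICT (by name: the statement is the Claim_ definition above) =====
theorem encode_aux_spec : Claim_equal_encode_aux := by
  unfold Claim_equal_encode_aux Spec_encode_aux
  intro n k _ hpre
  obtain ⟨h1, h2⟩ := hpre
  rw [pvAltEq]
  by_cases hn : n = 0
  · subst hn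
    unfold encode_aux
    rw [if_pos rfl, pvZeroBits]
  · have hlt : n < 2 ^ k.toNat := by tauto
    have hmain := pvMain k.toNat n h1 hlt
    unfold encode_aux
    rw [if_neg hn]
    have hlen : (encodeLoop n).length ≤ k.toNat := by
      have := congrArg List.length hmain
      simp only [List.length_append, List.length_replicate, List.length_map,
        List.length_range] at this
      omega
    have hcast : (k - ((encodeLoop n).length : Int)).toNat = k.toNat - (encodeLoop n).length := by
      omega
    simp only [hcast]
    exact hmain
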